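-- pv_equiv track=rewrite | github.com/sinclairliang/Coursework | 5P/asgn7/wliang13_assign7.py | cards_to_suitstring
-- ===== SOURCE A (Python) =====
-- def cards_to_suitstring(cardslist):
--     """
--     Convert
--     :param cardslist:
--     :return: a string to represent ranks of cards.
--     """
--     suit_list = [0,0,0,0]
--     suit_string = []
--     for card in cardslist:
--         if card[1] == 'C':
--             #Club
--             suit_list[0] += 1
--         if card[1] == 'D':
--             #Diamond
--             suit_list[1] += 1
--         if card[1] == 'H':
--             #Heart
--             suit_list[2] += 1
--         if card[1] == 'S':
--             #Spade
--             suit_list[3] += 1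
--     for num in suit_list:
--         suit_string.append(str(num))
--     return (''.join(suit_string))
-- ===== SOURCE B (Python) =====
-- def cards_to_suitstring(cardslist):
--     return ''.join(str(sum(1 for c in cardslist if c[1] == s)) for s in 'CDHS')
-- ===== Notes on version B (the rewrite author's own statement) =====
-- stated objective: idiomatic
-- what changed: Replaces the single pass with four branch-ifs updating a mutable counter list by four per-suit counting scans over the fixed suit order 'CDHS', joined directly into the result string.
import Mathlib
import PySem

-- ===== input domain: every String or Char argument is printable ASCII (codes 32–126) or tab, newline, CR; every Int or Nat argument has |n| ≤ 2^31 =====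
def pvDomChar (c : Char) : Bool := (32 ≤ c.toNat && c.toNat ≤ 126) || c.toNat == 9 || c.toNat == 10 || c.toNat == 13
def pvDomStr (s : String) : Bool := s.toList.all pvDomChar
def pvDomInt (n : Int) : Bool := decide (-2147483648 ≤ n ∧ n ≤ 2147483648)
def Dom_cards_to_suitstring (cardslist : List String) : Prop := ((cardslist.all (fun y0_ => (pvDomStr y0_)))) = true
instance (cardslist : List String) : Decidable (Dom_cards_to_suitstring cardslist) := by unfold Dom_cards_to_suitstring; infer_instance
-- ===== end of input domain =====

-- B replaces A's single pass with four branch-ifs over a mutable counter list by one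
-- counting scan per suit in the fixed order 'CDHS', joined directly (idiomatic; return value only).

-- ===== PORT A =====
-- card[1]; under Pre_ the index is in range, the default is never used
def pvCardSuit (card : String) : Char := (PySem.Str.pyGet? card 1).getD ' '

def cards_to_suitstring (cardslist : List String) : String :=
  let suit_list : Int × Int × Int × Int :=
    cardslist.foldl (fun s card =>
      let c := pvCardSuit card
      let s := if c = 'C' then (s.1 + 1, s.2.1, s.2.2.1, s.2.2.2) else s
      let s := if c = 'D' then (s.1, s.2.1 + 1, s.2.2.1, s.2.2.2) else s
      let s := if c = 'H' then (s.1, s.2.1, s.2.2.1 + 1, s.2.2.2) else s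
      let s := if c = 'S' then (s.1, s.2.1, s.2.2.1, s.2.2.2 + 1) else s
      s) (0, 0, 0, 0)
  let suit_string := [suit_list.1, suit_list.2.1, suit_list.2.2.1, suit_list.2.2.2].map PySem.Int.toStr
  String.join suit_string

-- ===== PORT B =====
def pvSuitCount (cardslist : List String) (s : Char) : Int :=
  cardslist.foldl (fun acc c => if pvCardSuit c = s then acc + 1 else acc) 0

def cards_to_suitstring_alt (cardslist : List String) : String :=
  String.join (('C' :: 'D' :: 'H' :: 'S' :: []).map (fun s => PySem.Int.toStr (pvSuitCount cardslist s)))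

-- ===== PRECONDITION & SPEC =====
-- Pre_ excludes lists containing a card shorter than 2 characters, on which A raises IndexError at card[1].
def Pre_cards_to_suitstring (cardslist : List String) : Prop :=
  ∀ card ∈ cardslist, 2 ≤ card.toList.length
instance (cardslist : List String) : Decidable (Pre_cards_to_suitstring cardslist) := by
  unfold Pre_cards_to_suitstring; infer_instance

def pvWitness_cards_to_suitstring : List String := ["2C", "KH"]

def Spec_cards_to_suitstring (cardslist : List String) (out : String) : Prop := out = cards_to_suitstring_alt cardslist
instance (cardslist : List String) (out : String) : Decidable (Spec_cards_to_suitstring cardslist out) := by unfold Spec_cards_to_suitstring; infer_instance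

-- ===== CLAIM (what is proved, stated in full; the proofs are below) =====
def Claim_equal_cards_to_suitstring : Prop := ∀ (cardslist : List String), Dom_cards_to_suitstring cardslist → Pre_cards_to_suitstring cardslist → Spec_cards_to_suitstring cardslist (cards_to_suitstring cardslist)

-- ===== LEMMAS AND PROOFS =====

theorem pvSuitCount_shift (cardslist : List String) (s : Char) (a : Int) :
    cardslist.foldl (fun acc c => if pvCardSuit c = s then acc + 1 else acc) a
      = a + pvSuitCount cardslist s := by
  induction cardslist generalizing a with
  | nil => simp [pvSuitCount]
  | cons x xs ih =>
    simp only [pvSuitCount, List.foldl_cons]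
    rw [ih, ih]
    split <;> ring_nf

theorem pvFoldA_eq (cardslist : List String) (a b c d : Int) :
    cardslist.foldl (fun s card =>
      let ch := pvCardSuit card
      let s := if ch = 'C' then (s.1 + 1, s.2.1, s.2.2.1, s.2.2.2) else s
      let s := if ch = 'D' then (s.1, s.2.1 + 1, s.2.2.1, s.2.2.2) else s
      let s := if ch = 'H' then (s.1, s.2.1, s.2.2.1 + 1, s.2.2.2) else s
      let s := if ch = 'S' then (s.1, s.2.1, s.2.2.1, s.2.2.2 + 1) else s
      s) ((a, b, c, d) : Int × Int × Int × Int)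
    = (a + pvSuitCount cardslist 'C', b + pvSuitCount cardslist 'D',
       c + pvSuitCount cardslist 'H', d + pvSuitCount cardslist 'S') := by
  induction cardslist generalizing a b c d with
  | nil => simp [pvSuitCount]
  | cons x xs ih =>
    simp only [List.foldl_cons]
    simp only [pvSuitCount, List.foldl_cons]
    rw [pvSuitCount_shift xs 'C', pvSuitCount_shift xs 'D',
        pvSuitCount_shift xs 'H', pvSuitCount_shift xs 'S']
    split_ifs <;> simp_all [Prod.ext_iff] <;> omega

-- ===== VERDICT (by name: the statement is the Claim_ definition above) =====
theorem cards_to_suitstring_spec : Claim_equal_cards_to_suitstring := by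
  intro cardslist _ _
  unfold Spec_cards_to_suitstring cards_to_suitstring cards_to_suitstring_alt
  simp only [pvFoldA_eq]
  simp
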